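-- pv_equiv track=rewrite | github.com/travisrecupero/wow_legendary_decider | main.py | categorize_members
-- ===== SOURCE A (Python) =====
-- def categorize_members(members):
--     guild_master = []
--     healers = []
--     dps = []
--     new_dps = []
--     new_healers = []
--
--     for member in members:
--         if member["role"] == "guild master":
--             guild_master.append(member)
--         elif member["role"] == "healer":
--             healers.append(member)
--         elif member["role"] == "dps":
--             dps.append(member)
--         elif member["role"] == "new dps":
--             new_dps.append(member)
--         elif member["role"] == "new healer":
--             new_healers.append(member)
--
--     return guild_master, healers, dps, new_dps, new_healers
-- ===== SOURCE B (Python) =====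
-- def categorize_members(members):
--     guild_master = [m for m in members if m["role"] == "guild master"]
--     healers = [m for m in members if m["role"] == "healer"]
--     dps = [m for m in members if m["role"] == "dps"]
--     new_dps = [m for m in members if m["role"] == "new dps"]
--     new_healers = [m for m in members if m["role"] == "new healer"]
--     return guild_master, healers, dps, new_dps, new_healers
-- ===== Notes on version B (the rewrite author's own statement) =====
-- stated objective: idiomatic
-- what changed: Replaces the single accumulating loop with five per-role list comprehensions (five filtered passes in role order) instead of one pass maintaining five accumulators.
import Mathlib
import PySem

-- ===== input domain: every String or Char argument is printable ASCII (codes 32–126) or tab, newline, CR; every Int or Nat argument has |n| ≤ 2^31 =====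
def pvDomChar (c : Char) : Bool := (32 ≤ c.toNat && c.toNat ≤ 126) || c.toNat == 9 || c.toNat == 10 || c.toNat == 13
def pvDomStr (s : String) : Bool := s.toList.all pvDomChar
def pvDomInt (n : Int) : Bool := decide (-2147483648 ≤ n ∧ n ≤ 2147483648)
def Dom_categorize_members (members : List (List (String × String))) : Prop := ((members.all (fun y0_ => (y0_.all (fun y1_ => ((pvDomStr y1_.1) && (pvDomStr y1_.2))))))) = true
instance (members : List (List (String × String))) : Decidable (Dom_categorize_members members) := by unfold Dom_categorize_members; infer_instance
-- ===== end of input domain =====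

-- B replaces A's single accumulating loop by five per-role list comprehensions (idiomatic; same O(n) cost up to a constant factor).

-- member["role"]: first-match lookup in the association list (Python dict)
def pvRole (m : List (String × String)) : String :=
  ((m.find? (fun p => p.1 == "role")).map (·.2)).getD ""

-- ===== PORT A =====
-- A's loop: one pass, five accumulators (the Python's five lists), branches in A's order.
def catAuxA (members : List (List (String × String)))
    (g h d nd nh : List (List (String × String))) :
    (List (List (String × String))) × (List (List (String × String))) × (List (List (String × String))) × (List (List (String × String))) × (List (List (String × String))) :=
  match members with
  | [] => (g, h, d, nd, nh)
  | m :: ms =>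
    let r := pvRole m
    if r = "guild master" then catAuxA ms (g ++ [m]) h d nd nh
    else if r = "healer" then catAuxA ms g (h ++ [m]) d nd nh
    else if r = "dps" then catAuxA ms g h (d ++ [m]) nd nh
    else if r = "new dps" then catAuxA ms g h d (nd ++ [m]) nh
    else if r = "new healer" then catAuxA ms g h d nd (nh ++ [m])
    else catAuxA ms g h d nd nh

def categorize_members (members : List (List (String × String))) : (List (List (String × String))) × (List (List (String × String))) × (List (List (String × String))) × (List (List (String × String))) × (List (List (String × String))) :=
  catAuxA members [] [] [] [] []

-- ===== PORT B =====
-- B: five list comprehensions, one filtered pass per role.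
def categorize_members_alt (members : List (List (String × String))) : (List (List (String × String))) × (List (List (String × String))) × (List (List (String × String))) × (List (List (String × String))) × (List (List (String × String))) :=
  (members.filter (fun m => pvRole m == "guild master"),
   members.filter (fun m => pvRole m == "healer"),
   members.filter (fun m => pvRole m == "dps"),
   members.filter (fun m => pvRole m == "new dps"),
   members.filter (fun m => pvRole m == "new healer"))

-- ===== PRECONDITION & SPEC =====
-- Pre_ excludes members lacking a "role" key, on which A (and B) raise KeyError.
def Pre_categorize_members (members : List (List (String × String))) : Prop :=
  (members.all (fun m => m.any (fun p => p.1 == "role"))) = true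
instance (members : List (List (String × String))) : Decidable (Pre_categorize_members members) := by unfold Pre_categorize_members; infer_instance
def pvWitness_categorize_members : (List (List (String × String))) :=
  [[("role", "healer"), ("name", "a")], [("role", "dps")]]

def Spec_categorize_members (members : List (List (String × String))) (out : (List (List (String × String))) × (List (List (String × String))) × (List (List (String × String))) × (List (List (String × String))) × (List (List (String × String)))) : Prop := out = categorize_members_alt members
instance (members : List (List (String × String))) (out : (List (List (String × String))) × (List (List (String × String))) × (List (List (String × String))) × (List (List (String × String))) × (List (List (String × String)))) : Decidable (Spec_categorize_members members out) := by
  unfold Spec_categorize_members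
  have hL : DecidableEq (List (List (String × String))) := inferInstance
  exact @instDecidableEqProd _ _ hL (@instDecidableEqProd _ _ hL (@instDecidableEqProd _ _ hL (@instDecidableEqProd _ _ hL hL))) out (categorize_members_alt members)

-- ===== CLAIM (what is proved, stated in full; the proofs are below) =====
def Claim_equal_categorize_members : Prop := ∀ (members : List (List (String × String))), Dom_categorize_members members → Pre_categorize_members members → Spec_categorize_members members (categorize_members members)

-- ===== LEMMAS AND PROOFS =====

-- A's loop, from an arbitrary starting state, appends the five filters to that state.
theorem catAuxA_eq (members : List (List (String × String)))
    (g h d nd nh : List (List (String × String))) :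
    catAuxA members g h d nd nh
    = (g ++ members.filter (fun m => pvRole m == "guild master"),
       h ++ members.filter (fun m => pvRole m == "healer"),
       d ++ members.filter (fun m => pvRole m == "dps"),
       nd ++ members.filter (fun m => pvRole m == "new dps"),
       nh ++ members.filter (fun m => pvRole m == "new healer")) := by
  induction members generalizing g h d nd nh with
  | nil => simp [catAuxA]
  | cons m ms ih =>
    simp only [catAuxA, List.filter_cons]
    split_ifs <;> simp_all

-- ===== VERDICT (by name: the statement is the Claim_ definition above) =====
theorem categorize_members_spec : Claim_equal_categorize_members := by
  intro members _ _
  show categorize_members members = categorize_members_alt members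
  simp [categorize_members, categorize_members_alt, catAuxA_eq]
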